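-- pv_equiv track=rewrite | github.com/Fansadventure/Fullstack-development-on-Proces-Mining | backend/heuristic_miner.py | output_transitions
-- ===== SOURCE A (Python) =====
-- def output_transitions(transitions, direct_follows):
--     """return all outgoing transitions of each transition. \n
--     transitions: {a: 6, e: 1, d: 6, c: 5, b: 5} \n
--     direct_follows: {(a, e): 1, (e, d): 1, (a, c): 2, (c, b): 2, (b, d): 2, (a, b): 3, (b, c): 3, (c, d): 3} \n
--     return: {a: [e, c, b], e: [d], d: [], c: [b, d], b: [d, c]}
--     """
--     result = {}
--     for t in transitions:
--         output_arc = []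
--         for df in direct_follows:
--             if t == df[0]:
--                 output_arc.append(df[1])
--         result[t] = output_arc
--     return result
-- ===== SOURCE B (Python) =====
-- def output_transitions(transitions, direct_follows):
--     """Group direct_follows by source first, then read each transition's bucket.
--     One pass over direct_follows + one over transitions (O(T+D) vs A's O(T*D))."""
--     index = {}
--     for source, target in direct_follows:
--         index.setdefault(source, []).append(target)
--     return {t: index.get(t, []) for t in transitions}
-- ===== Notes on version B (the rewrite author's own statement) =====
-- stated objective: faster
-- what changed: B builds an index dict grouping direct_follows targets by source in one pass, then maps each transition to its bucket via lookup, instead of A's rescan of all direct_follows once per transition.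
import Mathlib
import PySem

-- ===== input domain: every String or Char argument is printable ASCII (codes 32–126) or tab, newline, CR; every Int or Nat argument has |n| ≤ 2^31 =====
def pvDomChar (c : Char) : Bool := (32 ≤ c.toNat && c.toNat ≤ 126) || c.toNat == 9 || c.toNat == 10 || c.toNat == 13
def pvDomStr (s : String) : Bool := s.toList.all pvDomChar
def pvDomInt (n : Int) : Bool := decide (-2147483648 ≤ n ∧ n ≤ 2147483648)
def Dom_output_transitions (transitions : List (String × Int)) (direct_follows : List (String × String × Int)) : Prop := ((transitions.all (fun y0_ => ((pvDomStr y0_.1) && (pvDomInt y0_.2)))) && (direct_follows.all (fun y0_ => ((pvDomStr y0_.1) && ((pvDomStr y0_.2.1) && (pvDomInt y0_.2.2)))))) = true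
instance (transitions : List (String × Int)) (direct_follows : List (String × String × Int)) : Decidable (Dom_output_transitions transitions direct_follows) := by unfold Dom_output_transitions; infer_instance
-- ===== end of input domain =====

-- B groups direct_follows by source into an index dict once, then maps each transition to its bucket (O(T+D) vs A's O(T*D)).

-- ===== PORT A =====
-- 'for t in transitions' / 'for df in direct_follows' iterate the KEYS of the Python dicts, so both
-- association lists are read through PySem.Dict.ofList (duplicate keys collapse exactly as in a Python dict).
def output_transitions (transitions : List (String × Int)) (direct_follows : List (String × String × Int)) : List (String × List String) :=
  let dfKeys : List (String × String) :=
    (PySem.Dict.ofList (direct_follows.map (fun d => ((d.1, d.2.1), d.2.2)))).keys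
  let result : PySem.Dict String (List String) :=
    (PySem.Dict.ofList transitions).keys.foldl
      (fun r t =>
        let output_arc := dfKeys.foldl (fun arc df => if t == df.1 then arc ++ [df.2] else arc) []
        r.insert t output_arc)
      PySem.Dict.empty
  result.items

-- ===== PORT B =====
-- index.setdefault(source, []).append(target) = store (old bucket or []) ++ [target] under source.
-- The dict comprehension over transitions' keys is a map, since a dict built over nodup keys lists them in that order.
def output_transitions_alt (transitions : List (String × Int)) (direct_follows : List (String × String × Int)) : List (String × List String) :=
  let index : PySem.Dict String (List String) :=
    (PySem.Dict.ofList (direct_follows.map (fun d => ((d.1, d.2.1), d.2.2)))).keys.foldl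
      (fun ix p => ix.insert p.1 (ix.getD p.1 [] ++ [p.2])) PySem.Dict.empty
  (PySem.Dict.ofList transitions).keys.map (fun t => (t, index.getD t []))

-- ===== PRECONDITION & SPEC =====
def Spec_output_transitions (transitions : List (String × Int)) (direct_follows : List (String × String × Int)) (out : List (String × List String)) : Prop := out = output_transitions_alt transitions direct_follows
instance (transitions : List (String × Int)) (direct_follows : List (String × String × Int)) (out : List (String × List String)) : Decidable (Spec_output_transitions transitions direct_follows out) := by unfold Spec_output_transitions; infer_instance

-- ===== CLAIM (what is proved, stated in full; the proofs are below) =====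
def Claim_equal_output_transitions : Prop := ∀ (transitions : List (String × Int)) (direct_follows : List (String × String × Int)), Dom_output_transitions transitions direct_follows → Spec_output_transitions transitions direct_follows (output_transitions transitions direct_follows)

-- ===== LEMMAS AND PROOFS =====

-- The index fold's bucket at t is the old bucket plus the targets of pairs with source t, in order.
theorem indexFold_getD (dfs : List (String × String)) (d : PySem.Dict String (List String)) (t : String) :
    (dfs.foldl (fun ix p => ix.insert p.1 (ix.getD p.1 [] ++ [p.2])) d).getD t []
      = d.getD t [] ++ (dfs.filter (fun p => p.1 == t)).map (·.2) := by
  induction dfs generalizing d with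
  | nil => simp
  | cons p rest ih =>
    simp only [List.foldl_cons]
    rw [ih]
    by_cases ht : t = p.1
    · subst ht
      simp [List.append_assoc]
    · have h1 : (p.1 == t) = false := by simpa using Ne.symm ht
      simp [PySem.Dict.getD_insert, ht, h1]

-- ===== VERDICT (by name: the statement is the Claim_ definition above) =====
theorem output_transitions_spec : Claim_equal_output_transitions := by
  intro ts dfs _
  unfold Spec_output_transitions output_transitions output_transitions_alt
  simp only []
  set keys := (PySem.Dict.ofList ts).keys with hkd
  set dfKeys := (PySem.Dict.ofList (dfs.map (fun d => ((d.1, d.2.1), d.2.2)))).keys with hdfk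
  have hknd : keys.Nodup := PySem.Dict.nodup_keys_ofList ts
  have hfreshA : ∀ t ∈ keys, (PySem.Dict.empty : PySem.Dict String (List String)).contains (id t) = false := by
    intro t _; exact PySem.Dict.contains_empty t
  have hmapnd : (keys.map id).Nodup := by simpa using hknd
  have hA : (keys.foldl (fun r t => r.insert t (dfKeys.foldl (fun arc df => if t == df.1 then arc ++ [df.2] else arc) [])) PySem.Dict.empty).items
      = keys.map (fun t => (t, dfKeys.foldl (fun arc df => if t == df.1 then arc ++ [df.2] else arc) [])) := by
    have := PySem.Dict.items_foldl_insert_fresh keys (fun t => t)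
      (fun t => dfKeys.foldl (fun arc df => if t == df.1 then arc ++ [df.2] else arc) [])
      PySem.Dict.empty hfreshA hmapnd
    simpa using this
  rw [hA]
  apply List.map_congr_left
  intro t _
  rw [indexFold_getD, PySem.Dict.getD_empty,
    PySem.List.foldl_append_if (fun df => t == df.1) (·.2) dfKeys []]
  simp only [List.nil_append]
  have hfil : dfKeys.filter (fun df => t == df.1) = dfKeys.filter (fun p => p.1 == t) :=
    List.filter_congr (fun p _ => Bool.beq_comm ..)
  rw [hfil]
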